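-- pv_equiv track=rewrite | github.com/JonathanDLTran/Flashcard | edit2.py | insert_style_buffer
-- ===== SOURCE A (Python) =====
-- def insert_style_buffer(start_tup, end_tup, buffer, style):
--     x1, y1 = start_tup
--     x2, y2 = end_tup
--
--     if y1 == y2:
--         row = buffer[y1]
--         for i in list(range(x1, (x2 + 1), 1)):
--             c_list = row[i]
--             if style in c_list:
--                 c_list.remove(style)
--             else:
--                 c_list.append(style)
--         return buffer
--
--     else:
--         row = buffer[y1]
--         l = len(row)
--         for i in list(range(x1, l, 1)):
--             c_list = row[i]
--             if style in c_list:
--                 c_list.remove(style)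
--             else:
--                 c_list.append(style)
--
--         next_tup = (0, y1 + 1)
--         return insert_style_buffer(
--             next_tup, end_tup, buffer, style)
-- ===== SOURCE B (Python) =====
-- # Same return value as A; like A it toggles the cells of `buffer` in place.
-- def insert_style_buffer(start_tup, end_tup, buffer, style):
--     x1, y1 = start_tup
--     x2, y2 = end_tup
--     y = y1
--     start = x1
--     while True:
--         row = buffer[y]
--         end = x2 if y == y2 else len(row) - 1
--         for i in range(start, end + 1):
--             cell = row[i]
--             if style in cell:
--                 cell.remove(style)
--             else:
--                 cell.append(style)
--         if y == y2:
--             return buffer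
--         y += 1
--         start = 0
-- ===== Notes on version B (the rewrite author's own statement) =====
-- stated objective: simpler
-- what changed: Replaces A's tail recursion (which rebuilds a (0, y+1) start tuple and re-enters the whole function for every row) with a single explicit loop that carries the current row index and start column and computes each row's column bounds (start..x2 on the last row, start..len(row)-1 otherwise) in place.
import Mathlib
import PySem

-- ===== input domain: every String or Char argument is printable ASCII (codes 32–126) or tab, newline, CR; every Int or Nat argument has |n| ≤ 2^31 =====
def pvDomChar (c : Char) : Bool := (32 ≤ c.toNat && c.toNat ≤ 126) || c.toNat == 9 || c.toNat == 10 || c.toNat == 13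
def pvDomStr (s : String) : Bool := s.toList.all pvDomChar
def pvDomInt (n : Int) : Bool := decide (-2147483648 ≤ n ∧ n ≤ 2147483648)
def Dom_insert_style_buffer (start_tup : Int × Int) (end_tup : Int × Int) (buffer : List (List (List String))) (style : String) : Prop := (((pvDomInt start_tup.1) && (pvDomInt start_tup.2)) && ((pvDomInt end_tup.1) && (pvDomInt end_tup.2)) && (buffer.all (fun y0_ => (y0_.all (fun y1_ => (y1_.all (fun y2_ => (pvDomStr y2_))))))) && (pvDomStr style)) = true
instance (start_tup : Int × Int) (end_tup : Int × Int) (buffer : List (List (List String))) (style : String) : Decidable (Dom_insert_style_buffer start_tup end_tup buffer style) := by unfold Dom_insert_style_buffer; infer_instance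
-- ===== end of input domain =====

-- B replaces A's tail recursion (tuple rebuilt each row) by one loop that carries the
-- current row index and start column, with per-row column bounds computed in place (objective: simpler).
-- Both Pythons mutate `buffer` in place identically on Pre_; equivalence is about the return value.

-- ===== PORT A =====
-- A's inner for-loop over the index list, as structural recursion on that list;
-- row[i] → pyGet? (none = IndexError, excluded by Pre_), write-back via pySetD.
def pvToggleRowA (style : String) (row : List (List String)) (ixs : List Int) : List (List String) :=
  match ixs with
  | [] => row
  | i :: rest =>
      let row' :=
        match PySem.List.pyGet? row i with
        | none => row
        | some c =>
            PySem.List.pySetD row i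
              (if style ∈ c then (PySem.List.remove? c style).getD c else c ++ [style])
      pvToggleRowA style row' rest

-- A's recursion, with fuel making it total (enough fuel on every input Pre_ admits).
def pvInsertGoA (fuel : Nat) (start_tup : Int × Int) (end_tup : Int × Int)
    (buffer : List (List (List String))) (style : String) : List (List (List String)) :=
  match fuel with
  | 0 => buffer
  | Nat.succ f =>
      let x1 := start_tup.1
      let y1 := start_tup.2
      let x2 := end_tup.1
      let y2 := end_tup.2
      if y1 = y2 then
        match PySem.List.pyGet? buffer y1 with
        | none => buffer
        | some row =>
            PySem.List.pySetD buffer y1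
              (pvToggleRowA style row (PySem.List.pyRange x1 (x2 + 1) 1))
      else
        match PySem.List.pyGet? buffer y1 with
        | none => buffer
        | some row =>
            let l : Int := row.length
            let buffer' := PySem.List.pySetD buffer y1
              (pvToggleRowA style row (PySem.List.pyRange x1 l 1))
            pvInsertGoA f (0, y1 + 1) end_tup buffer' style

def insert_style_buffer (start_tup : Int × Int) (end_tup : Int × Int) (buffer : List (List (List String))) (style : String) : List (List (List String)) :=
  pvInsertGoA ((end_tup.2 - start_tup.2).toNat + 1) start_tup end_tup buffer style

-- ===== PORT B =====
-- B's `while True` loop: state = current row y and start column; fuel makes the port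
-- total (inside Pre_ the loop always returns before the fuel runs out).
def pvLoopB (fuel : Nat) (x2 y2 : Int) (style : String) (y start : Int)
    (buf : List (List (List String))) : List (List (List String)) :=
  match fuel with
  | 0 => buf
  | Nat.succ f =>
      match PySem.List.pyGet? buf y with
      | none => buf
      | some row =>
          let e : Int := if y = y2 then x2 else (row.length : Int) - 1
          let row' := (PySem.List.pyRange start (e + 1) 1).foldl
            (fun r i =>
              match PySem.List.pyGet? r i with
              | none => r
              | some c => PySem.List.pySetD r i (if style ∈ c then c.erase style else c ++ [style]))
            row
          let buf' := PySem.List.pySetD buf y row'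
          if y = y2 then buf' else pvLoopB f x2 y2 style (y + 1) 0 buf'

def insert_style_buffer_alt (start_tup : Int × Int) (end_tup : Int × Int) (buffer : List (List (List String))) (style : String) : List (List (List String)) :=
  pvLoopB ((end_tup.2 - start_tup.2).toNat + 1) end_tup.1 end_tup.2 style start_tup.2 start_tup.1 buffer

-- ===== PRECONDITION & SPEC =====
-- Pre_ = exactly the inputs on which Python A returns (no IndexError): the rows visited,
-- y1..y2, lie in range (negative indices wrap), the first row's column range starts in
-- range (or is empty), and the last row's column range ends in range (or is empty).
def Pre_insert_style_buffer (start_tup : Int × Int) (end_tup : Int × Int) (buffer : List (List (List String))) (style : String) : Prop :=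
  let x1 := start_tup.1
  let y1 := start_tup.2
  let x2 := end_tup.1
  let y2 := end_tup.2
  let n : Int := buffer.length
  let l1 : Int := (PySem.List.pyGetD buffer y1 []).length
  let l2 : Int := (PySem.List.pyGetD buffer y2 []).length
  y1 ≤ y2 ∧ -n ≤ y1 ∧ y2 < n ∧
    (if y1 = y2 then (x1 ≤ x2 → (-l1 ≤ x1 ∧ x2 < l1))
     else ((-l1 ≤ x1 ∨ l1 ≤ x1) ∧ (0 ≤ x2 → x2 < l2)))
instance (start_tup : Int × Int) (end_tup : Int × Int) (buffer : List (List (List String))) (style : String) : Decidable (Pre_insert_style_buffer start_tup end_tup buffer style) := by unfold Pre_insert_style_buffer; infer_instance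

def pvWitness_insert_style_buffer : (Int × Int) × (Int × Int) × List (List (List String)) × String :=
  ((0, 0), (0, 1), [[["a"]], [["b"], []]], "x")

def Spec_insert_style_buffer (start_tup : Int × Int) (end_tup : Int × Int) (buffer : List (List (List String))) (style : String) (out : List (List (List String))) : Prop := out = insert_style_buffer_alt start_tup end_tup buffer style
instance (start_tup : Int × Int) (end_tup : Int × Int) (buffer : List (List (List String))) (style : String) (out : List (List (List String))) : Decidable (Spec_insert_style_buffer start_tup end_tup buffer style out) := by unfold Spec_insert_style_buffer; infer_instance

-- ===== CLAIM (what is proved, stated in full; the proofs are below) =====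
def Claim_equal_insert_style_buffer : Prop := ∀ (start_tup : Int × Int) (end_tup : Int × Int) (buffer : List (List (List String))) (style : String), Dom_insert_style_buffer start_tup end_tup buffer style → Pre_insert_style_buffer start_tup end_tup buffer style → Spec_insert_style_buffer start_tup end_tup buffer style (insert_style_buffer start_tup end_tup buffer style)

-- ===== LEMMAS AND PROOFS =====

-- A's hand-written row loop equals B's foldl with B's step function.
theorem pvToggleRowA_eq_foldl (style : String) (ixs : List Int) (row : List (List String)) :
    pvToggleRowA style row ixs
      = ixs.foldl
          (fun r i =>
            match PySem.List.pyGet? r i with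
            | none => r
            | some c => PySem.List.pySetD r i (if style ∈ c then c.erase style else c ++ [style]))
          row := by
  induction ixs generalizing row with
  | nil => rfl
  | cons i rest ih =>
      rw [pvToggleRowA, List.foldl_cons, ih]
      congr 1
      cases h : PySem.List.pyGet? row i with
      | none => simp
      | some c =>
          simp only
          by_cases hc : style ∈ c
          · rw [if_pos hc, if_pos hc, PySem.List.remove?_eq_some_erase c style hc, Option.getD_some]
          · rw [if_neg hc, if_neg hc]

-- The two ports agree step for step: same fuel, same row fetched, same column range
-- toggled, same recursive step — only the loop state is carried differently.
theorem pvInsertGoA_eq_pvLoopB (x2 y2 : Int) (style : String) :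
    ∀ (fuel : Nat) (y1 x1 : Int) (buf : List (List (List String))),
      pvInsertGoA fuel (x1, y1) (x2, y2) buf style = pvLoopB fuel x2 y2 style y1 x1 buf := by
  intro fuel
  induction fuel with
  | zero => intro y1 x1 buf; rfl
  | succ f ih =>
      intro y1 x1 buf
      rw [pvInsertGoA, pvLoopB]
      by_cases heq : y1 = y2
      · subst heq
        cases PySem.List.pyGet? buf y1 with
        | none => simp
        | some row => simp [pvToggleRowA_eq_foldl]
      · simp only [if_neg heq]
        cases PySem.List.pyGet? buf y1 with
        | none => rfl
        | some row =>
            simp only [ih]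
            rw [pvToggleRowA_eq_foldl, (by omega : ((row.length : Int) - 1) + 1 = (row.length : Int))]

-- ===== VERDICT (by name: the statement is the Claim_ definition above) =====
theorem insert_style_buffer_spec : Claim_equal_insert_style_buffer := by
  intro start_tup end_tup buffer style _ _
  unfold Spec_insert_style_buffer insert_style_buffer insert_style_buffer_alt
  exact pvInsertGoA_eq_pvLoopB end_tup.1 end_tup.2 style _ start_tup.2 start_tup.1 buffer
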